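-- pv_equiv track=rewrite | github.com/fuhao23/SBEM | Model/Ours/DpktParseStatic.py | splitFlowByDir
-- ===== SOURCE A (Python) =====
-- def splitFlowByDir(flows, direction):
--     """
--     通过方向将一个流划分成小块
--     每个小块都是同一个方向的
--     :param flows:
--     :param direction:
--     :return:
--     """
--     assert len(flows) == len(direction)
--     res = list()
--     curdir = direction[0]
--     orallist = list()
--     orallist.append(flows[0])
--     for d_i, pktdir in enumerate(direction):
--         if d_i == 0:
--             continue
--         if curdir == pktdir:
--             orallist.append(flows[d_i])
--         else:
--             res.append(orallist)
--             orallist = list()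
--             orallist.append(flows[d_i])
--             curdir = pktdir
--     res.append(orallist)
--     return res
-- ===== SOURCE B (Python) =====
-- def splitFlowByDir(flows, direction):
--     assert len(flows) == len(direction)
--     n = len(direction)
--     if n == 0:
--         return []
--     cuts = [0]
--     for i in range(1, n):
--         if direction[i] != direction[i - 1]:
--             cuts.append(i)
--     cuts.append(n)
--     return [list(flows[cuts[k]:cuts[k + 1]]) for k in range(len(cuts) - 1)]
-- ===== Notes on version B (the rewrite author's own statement) =====
-- stated objective: alternative
-- what changed: B replaces A's element-by-element run accumulation (current-direction state, growing run list) with a two-phase boundary table: first collect the indices where direction changes, then slice flows between consecutive boundaries.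
import Mathlib
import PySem

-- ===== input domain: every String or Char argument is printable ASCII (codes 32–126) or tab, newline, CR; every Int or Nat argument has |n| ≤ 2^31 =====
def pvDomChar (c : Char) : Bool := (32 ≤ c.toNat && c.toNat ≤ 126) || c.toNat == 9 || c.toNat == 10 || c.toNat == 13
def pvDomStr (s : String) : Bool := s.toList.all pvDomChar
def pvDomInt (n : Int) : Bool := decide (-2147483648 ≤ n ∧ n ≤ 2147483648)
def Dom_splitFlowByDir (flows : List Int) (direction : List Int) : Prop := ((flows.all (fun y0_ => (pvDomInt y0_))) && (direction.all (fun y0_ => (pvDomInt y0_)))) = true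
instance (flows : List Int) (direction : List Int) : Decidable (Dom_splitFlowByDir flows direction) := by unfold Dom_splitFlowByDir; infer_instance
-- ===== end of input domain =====

-- B replaces A's element-by-element run accumulation with a boundary-index table followed by slicing
-- (same O(n) cost, a different decomposition); equivalence is about return values on nonempty equal-length inputs.

-- ===== PORT A =====
-- the `for d_i, pktdir in enumerate(direction):` loop, state (curdir, orallist, res)
def loopA (flows : List Int) : Nat → List Int → Int × List Int × List (List Int) → Int × List Int × List (List Int)
  | _, [], st => st
  | dI, pktdir :: rest, (curdir, orallist, res) =>
      if dI = 0 then loopA flows (dI + 1) rest (curdir, orallist, res)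
      else if curdir = pktdir then
        loopA flows (dI + 1) rest (curdir, orallist ++ [PySem.List.pyGetD flows (dI : Int) 0], res)
      else
        loopA flows (dI + 1) rest (pktdir, [PySem.List.pyGetD flows (dI : Int) 0], res ++ [orallist])

def splitFlowByDir (flows : List Int) (direction : List Int) : List (List Int) :=
  if flows.length = direction.length then  -- assert; unequal lengths raise (excluded by Pre_)
    match flows, direction with
    | f0 :: _, d0 :: _ =>                  -- direction[0] / flows[0]; empty raises IndexError (excluded by Pre_)
        let st := loopA flows 0 direction (d0, [f0], [])
        st.2.2 ++ [st.2.1]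
    | _, _ => []
  else []

-- ===== PORT B =====
def splitFlowByDir_alt (flows : List Int) (direction : List Int) : List (List Int) :=
  if flows.length = direction.length then  -- assert
    let n := direction.length
    if n = 0 then []
    else
      let cuts := (PySem.List.pyRange 1 (n : Int) 1).foldl
        (fun c i => if PySem.List.pyGetD direction i 0 ≠ PySem.List.pyGetD direction (i - 1) 0 then c ++ [i] else c)
        [(0 : Int)] ++ [(n : Int)]
      (List.range (cuts.length - 1)).map
        (fun k => PySem.List.slice flows (some (cuts.getD k 0)) (some (cuts.getD (k + 1) 0)))
  else []

-- ===== PRECONDITION & SPEC =====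
-- Pre_ excludes unequal lengths (A's assert raises AssertionError) and empty input (direction[0] raises IndexError).
def Pre_splitFlowByDir (flows : List Int) (direction : List Int) : Prop :=
  flows ≠ [] ∧ flows.length = direction.length
instance (flows : List Int) (direction : List Int) : Decidable (Pre_splitFlowByDir flows direction) := by
  unfold Pre_splitFlowByDir; infer_instance
def pvWitness_splitFlowByDir : List Int × List Int := ([1, 1, 2, 3], [0, 0, 1, 0])

def Spec_splitFlowByDir (flows : List Int) (direction : List Int) (out : List (List Int)) : Prop := out = splitFlowByDir_alt flows direction
instance (flows : List Int) (direction : List Int) (out : List (List Int)) : Decidable (Spec_splitFlowByDir flows direction out) := by unfold Spec_splitFlowByDir; infer_instance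

-- ===== CLAIM (what is proved, stated in full; the proofs are below) =====
def Claim_equal_splitFlowByDir : Prop := ∀ (flows : List Int) (direction : List Int), Dom_splitFlowByDir flows direction → Pre_splitFlowByDir flows direction → Spec_splitFlowByDir flows direction (splitFlowByDir flows direction)
-- ===== LEMMAS AND PROOFS =====

-- reference: remaining flows fs / directions ds, current run cur with direction d
def runsF (cur : List Int) (d : Int) : List Int → List Int → List (List Int)
  | _, [] => [cur]
  | [], _ :: _ => [cur]          -- unreachable under equal lengths
  | f :: fs, e :: ds => if d = e then runsF (cur ++ [f]) d fs ds else cur :: runsF [f] e fs ds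

-- change points (as Nat indices) of d :: ds, where j is the index of the head of ds
def cp (d : Int) (j : Nat) : List Int → List Nat
  | [] => []
  | e :: ds => if e ≠ d then j :: cp e (j + 1) ds else cp e (j + 1) ds

-- slices of flows between consecutive cut points
def slicesOf (flows : List Int) : List Nat → List (List Int)
  | a :: b :: rest => ((flows.drop a).take (b - a)) :: slicesOf flows (b :: rest)
  | _ => []

lemma loopA_run : ∀ (ds fs pre cur : List Int) (res : List (List Int)) (curdir : Int),
    fs.length = ds.length → pre ≠ [] →
    (loopA (pre ++ fs) pre.length ds (curdir, cur, res)).2.2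
        ++ [(loopA (pre ++ fs) pre.length ds (curdir, cur, res)).2.1]
      = res ++ runsF cur curdir fs ds := by
  intro ds
  induction ds with
  | nil =>
      intro fs pre cur res curdir hlen hpre
      cases fs with
      | nil => simp [loopA, runsF]
      | cons f fs => simp at hlen
  | cons e ds ih =>
      intro fs pre cur res curdir hlen hpre
      cases fs with
      | nil => simp at hlen
      | cons f fs =>
        have hj : pre.length ≠ 0 := by simpa using hpre
        have hget : PySem.List.pyGetD (pre ++ f :: fs) (pre.length : Int) 0 = f := by
          rw [PySem.List.pyGetD_natCast]
          simp [List.getD]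
        have hlen' : fs.length = ds.length := by simpa using hlen
        by_cases hd : curdir = e
        · have step : loopA (pre ++ f :: fs) pre.length (e :: ds) (curdir, cur, res)
              = loopA (pre ++ [f] ++ fs) (pre ++ [f]).length ds (curdir, cur ++ [f], res) := by
            simp [loopA, hj, hd, hget]
          rw [step, ih fs (pre ++ [f]) (cur ++ [f]) res curdir hlen' (by simp)]
          simp [runsF, hd]
        · have step : loopA (pre ++ f :: fs) pre.length (e :: ds) (curdir, cur, res)
              = loopA (pre ++ [f] ++ fs) (pre ++ [f]).length ds (e, [f], res ++ [cur]) := by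
            simp [loopA, hj, hd, hget]
          rw [step, ih fs (pre ++ [f]) [f] (res ++ [cur]) e hlen' (by simp)]
          simp [runsF, hd]

lemma cuts_run : ∀ (ds pre : List Int) (d : Int) (direction : List Int),
    direction = pre ++ ds → pre.getLast? = some d →
    (PySem.List.pyRange (pre.length : Int) (direction.length : Int) 1).filter
        (fun i => decide (PySem.List.pyGetD direction i 0 ≠ PySem.List.pyGetD direction (i - 1) 0))
      = (cp d pre.length ds).map (fun a : Nat => (a : Int)) := by
  intro ds
  induction ds with
  | nil =>
      intro pre d direction hdir _
      have : direction.length = pre.length := by simp [hdir]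
      rw [this, PySem.List.pyRange_one_eq_nil (le_refl _)]
      simp [cp]
  | cons e ds ih =>
      intro pre d direction hdir hlast
      have hpre : pre ≠ [] := by
        intro h; rw [h] at hlast; simp at hlast
      have hpl : 1 ≤ pre.length := by
        cases pre with
        | nil => exact absurd rfl hpre
        | cons _ _ => simp
      have hlt : (pre.length : Int) < (direction.length : Int) := by
        have : direction.length = pre.length + (ds.length + 1) := by simp [hdir]
        omega
      rw [PySem.List.pyRange_one_cons hlt, List.filter_cons]
      have hgj : PySem.List.pyGetD direction (pre.length : Int) 0 = e := by
        rw [PySem.List.pyGetD_natCast, hdir]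
        simp [List.getD]
      have hcast : (pre.length : Int) - 1 = ((pre.length - 1 : Nat) : Int) := by omega
      have hgj1 : PySem.List.pyGetD direction ((pre.length : Int) - 1) 0 = d := by
        rw [hcast, PySem.List.pyGetD_natCast, hdir]
        have hlt1 : pre.length - 1 < pre.length := by omega
        have : (pre ++ e :: ds)[pre.length - 1]? = pre[pre.length - 1]? :=
          List.getElem?_append_left hlt1
        rw [List.getD, this, ← List.getLast?_eq_getElem?, hlast]
        rfl
      have hih := ih (pre ++ [e]) e direction (by simp [hdir]) List.getLast?_concat
      have hlen1 : ((pre ++ [e]).length : Int) = (pre.length : Int) + 1 := by simp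
      rw [hlen1] at hih
      rw [hgj, hgj1]
      by_cases he : e = d
      · rw [if_neg (by simp [he]), hih]
        subst he
        simp [cp]
      · rw [if_pos (by simp [he]), hih]
        simp [cp, he]

lemma slices_map : ∀ (rest : List Nat) (a : Nat) (flows : List Int),
    (List.range (((a :: rest).map (fun x : Nat => (x : Int))).length - 1)).map (fun k =>
        PySem.List.slice flows (some (((a :: rest).map (fun x : Nat => (x : Int))).getD k 0))
                               (some (((a :: rest).map (fun x : Nat => (x : Int))).getD (k + 1) 0)))
      = slicesOf flows (a :: rest) := by
  intro rest
  induction rest with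
  | nil => intro a flows; simp [slicesOf]
  | cons b rest ih =>
      intro a flows
      have hlen : ((a :: b :: rest).map (fun x : Nat => (x : Int))).length - 1 = rest.length + 1 := by simp
      rw [hlen, List.range_succ_eq_map, List.map_cons, List.map_map]
      have hhead : PySem.List.slice flows
            (some (((a :: b :: rest).map (fun x : Nat => (x : Int))).getD 0 0))
            (some (((a :: b :: rest).map (fun x : Nat => (x : Int))).getD 1 0))
          = (flows.drop a).take (b - a) := by
        simp [List.getD, PySem.List.slice_natCast]
      have htail := ih b flows
      have hlen2 : ((b :: rest).map (fun x : Nat => (x : Int))).length - 1 = rest.length := by simp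
      rw [hlen2] at htail
      have htail2 : (List.range rest.length).map
          ((fun k => PySem.List.slice flows
              (some (((a :: b :: rest).map (fun x : Nat => (x : Int))).getD k 0))
              (some (((a :: b :: rest).map (fun x : Nat => (x : Int))).getD (k + 1) 0))) ∘ Nat.succ)
          = slicesOf flows (b :: rest) := by
        rw [← htail]
        apply List.map_congr_left
        intro k _
        simp [Function.comp]
      rw [slicesOf]
      exact congrArg₂ (· :: ·) hhead htail2

lemma glue : ∀ (ds fs : List Int) (c j : Nat) (d : Int) (flows : List Int),
    flows.drop j = fs → c ≤ j → fs.length = ds.length →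
    slicesOf flows (c :: (cp d j ds ++ [j + ds.length]))
      = runsF ((flows.drop c).take (j - c)) d fs ds := by
  intro ds
  induction ds with
  | nil =>
      intro fs c j d flows hdrop hcj hlen
      cases fs with
      | nil => simp [cp, slicesOf, runsF]
      | cons f fs => simp at hlen
  | cons e ds ih =>
      intro fs c j d flows hdrop hcj hlen
      cases fs with
      | nil => simp at hlen
      | cons f fs =>
        have hlen' : fs.length = ds.length := by simpa using hlen
        have hdrop1 : flows.drop (j + 1) = fs := by
          rw [← List.tail_drop, hdrop]
          rfl
        have hfj : flows[j]? = some f := by rw [← List.head?_drop, hdrop]; rfl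
        by_cases he : d = e
        · have hcur : (flows.drop c).take (j - c) ++ [f] = (flows.drop c).take (j + 1 - c) := by
            have h1 : (flows.drop c)[j - c]? = some f := by
              rw [List.getElem?_drop, show c + (j - c) = j by omega, hfj]
            rw [show j + 1 - c = (j - c) + 1 by omega, List.take_add_one, h1]
            rfl
          have hcp : cp d j (e :: ds) = cp d (j + 1) ds := by
            simp [cp, he]
          rw [hcp, show j + (e :: ds).length = (j + 1) + ds.length by simp; omega]
          rw [ih fs c (j + 1) d flows hdrop1 (by omega) hlen']
          rw [runsF, if_pos he, hcur]
        · have hcp : cp d j (e :: ds) = j :: cp e (j + 1) ds := by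
            simp [cp]
            intro h; exact absurd h.symm he
          rw [hcp]
          show slicesOf flows (c :: j :: (cp e (j + 1) ds ++ [j + (e :: ds).length])) = _
          rw [slicesOf]
          have hx := ih fs j (j + 1) e flows hdrop1 (by omega) hlen'
          have hone : (flows.drop j).take 1 = [f] := by rw [hdrop]; rfl
          rw [show j + 1 - j = 1 by omega, hone] at hx
          rw [show j + (e :: ds).length = (j + 1) + ds.length by simp; omega, hx]
          simp [runsF, he]

theorem splitFlowByDir_spec : Claim_equal_splitFlowByDir := by
  intro flows direction _ hpre
  obtain ⟨hne, hlen⟩ := hpre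
  unfold Spec_splitFlowByDir
  cases flows with
  | nil => exact absurd rfl hne
  | cons f0 fs =>
    cases direction with
    | nil => simp at hlen
    | cons d0 ds =>
      have hlen' : fs.length = ds.length := by simpa using hlen
      have hA : splitFlowByDir (f0 :: fs) (d0 :: ds) = runsF [f0] d0 fs ds := by
        have h0 : loopA (f0 :: fs) 0 (d0 :: ds) (d0, [f0], []) =
            loopA ([f0] ++ fs) ([f0] : List Int).length ds (d0, [f0], []) := by
          simp [loopA]
        simp only [splitFlowByDir, if_pos hlen]
        rw [h0, loopA_run ds fs [f0] [f0] [] d0 hlen' (by simp)]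
        simp
      have hB : splitFlowByDir_alt (f0 :: fs) (d0 :: ds) = runsF [f0] d0 fs ds := by
        simp only [splitFlowByDir_alt, if_pos hlen]
        have hn : (d0 :: ds).length ≠ 0 := by simp
        rw [if_neg hn]
        rw [PySem.List.foldl_append_ite_eq_filter
          (fun i => PySem.List.pyGetD (d0 :: ds) i 0 ≠ PySem.List.pyGetD (d0 :: ds) (i - 1) 0)]
        have hcuts := cuts_run ds [d0] d0 (d0 :: ds) rfl rfl
        simp only [show ([d0] : List Int).length = 1 from rfl, Nat.cast_one] at hcuts
        rw [hcuts]
        have hmap : ([(0 : Int)] ++ (cp d0 1 ds).map (fun a : Nat => (a : Int))) ++ [((d0 :: ds).length : Int)]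
            = ((0 :: (cp d0 1 ds ++ [ds.length + 1])).map (fun x : Nat => (x : Int))) := by
          simp
        rw [hmap, slices_map (cp d0 1 ds ++ [ds.length + 1]) 0 (f0 :: fs)]
        have hg := glue ds fs 0 1 d0 (f0 :: fs) rfl (by omega) hlen'
        rw [show (1 : Nat) + ds.length = ds.length + 1 from by omega] at hg
        simpa using hg
      rw [hA, hB]
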